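-- pv_equiv track=rewrite | github.com/jiajunma/Rethlas-plus | generator/decoder.py | _dedupe_identical_blocks
-- ===== SOURCE A (Python) =====
-- def _dedupe_identical_blocks(parsed: list[dict[str, str]]) -> list[dict[str, str]]:
--     """Collapse byte-identical duplicates emitted under the same label.
--
--     Codex sometimes echoes its draft batch and its final batch into
--     the same stdout stream, producing two ``<node>...</node>`` blocks
--     with the same label and the same body. The original strict check
--     rejected the batch as ``duplicate_label_in_batch`` even though
--     the two blocks carry no semantic disagreement. We preserve that
--     strictness when the bodies actually differ — that is a real
--     contract violation — but treat identical-body duplicates as a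
--     single emission (the last copy wins). Order is preserved by the
--     label's first occurrence so downstream consumers see a stable list.
--     """
--     first_index_for_label: dict[str, int] = {}
--     result: list[dict[str, str]] = []
--     for entry in parsed:
--         label = entry["label"]
--         prior_idx = first_index_for_label.get(label)
--         if prior_idx is None:
--             first_index_for_label[label] = len(result)
--             result.append(entry)
--             continue
--         if _entries_byte_equal(result[prior_idx], entry):
--             # Same content — replace the prior copy in-place so the
--             # last-emitted version wins while preserving its slot.
--             result[prior_idx] = entry
--         else:
--             # Different content — preserve both so the caller's
--             # duplicate-label check fires the correct rejection reason.
--             result.append(entry)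
--     return result
--
-- def _entries_byte_equal(a: dict[str, str], b: dict[str, str]) -> bool:
--     fields = ("kind", "statement", "proof", "remark", "source_note")
--     return all(a.get(f, "") == b.get(f, "") for f in fields)
-- ===== SOURCE B (Python) =====
-- def _dedupe_identical_blocks(parsed: list[dict[str, str]]) -> list[dict[str, str]]:
--     """Two-pass rewrite: precompute, per label, the byte-signature of its first
--     occurrence and the last entry carrying that signature (the winner); then emit
--     winners at first-occurrence slots and keep content-differing duplicates."""
--     fields = ("kind", "statement", "proof", "remark", "source_note")
--
--     def sig(entry: dict[str, str]) -> tuple[str, ...]: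
--         return tuple(entry.get(f, "") for f in fields)
--
--     first_sig: dict[str, tuple[str, ...]] = {}
--     winner: dict[str, dict[str, str]] = {}
--     for entry in parsed:
--         label = entry["label"]
--         s = sig(entry)
--         if label not in first_sig:
--             first_sig[label] = s
--             winner[label] = entry
--         elif s == first_sig[label]:
--             winner[label] = entry
--
--     result: list[dict[str, str]] = []
--     seen: set[str] = set()
--     for entry in parsed:
--         label = entry["label"]
--         if label not in seen:
--             seen.add(label)
--             result.append(winner[label])
--         elif sig(entry) != first_sig[label]:
--             result.append(entry)
--     return result
-- ===== Notes on version B (the rewrite author's own statement) =====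
-- stated objective: alternative
-- what changed: A's single pass that back-patches the first-occurrence slot in the result list via a label->index dict is replaced by two forward passes: pass 1 precomputes per label the first occurrence's byte-signature and the last byte-equal entry (the winner), pass 2 emits the winner at each label's first occurrence and appends content-differing duplicates.
import Mathlib
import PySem

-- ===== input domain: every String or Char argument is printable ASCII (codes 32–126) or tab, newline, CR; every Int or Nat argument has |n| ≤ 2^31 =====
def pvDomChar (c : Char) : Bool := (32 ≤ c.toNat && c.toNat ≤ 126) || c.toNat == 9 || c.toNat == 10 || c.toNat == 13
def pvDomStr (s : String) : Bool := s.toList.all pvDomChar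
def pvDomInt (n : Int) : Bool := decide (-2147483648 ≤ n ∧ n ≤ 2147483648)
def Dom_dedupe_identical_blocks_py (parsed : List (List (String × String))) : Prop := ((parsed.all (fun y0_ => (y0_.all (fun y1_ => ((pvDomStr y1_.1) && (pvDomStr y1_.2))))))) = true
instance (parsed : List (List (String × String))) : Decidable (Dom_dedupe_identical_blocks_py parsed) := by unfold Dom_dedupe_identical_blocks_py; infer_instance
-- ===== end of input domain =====

-- B replaces A's single pass with in-place slot rewriting by two passes (precompute per-label
-- first-signature and last byte-equal winner, then emit winners at first occurrences); objective: alternative.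


-- ===== PORT A =====
-- port of _entries_byte_equal
def pvFieldsA : List String := ["kind", "statement", "proof", "remark", "source_note"]

def entriesByteEqual (a b : List (String × String)) : Bool :=
  pvFieldsA.all (fun f => PySem.Dict.getD (PySem.Dict.mk a) f "" == PySem.Dict.getD (PySem.Dict.mk b) f "")

-- the for-loop of _dedupe_identical_blocks; none = KeyError on entry["label"]
def dedupeGoA : List (List (String × String)) → PySem.Dict String Int → List (List (String × String)) → Option (List (List (String × String)))
  | [], _, result => some result
  | entry :: rest, firstIndexForLabel, result =>
    match PySem.Dict.get? (PySem.Dict.mk entry) "label" with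
    | none => none
    | some label =>
      match PySem.Dict.get? firstIndexForLabel label with
      | none =>
          dedupeGoA rest (PySem.Dict.insert firstIndexForLabel label (result.length : Int)) (result ++ [entry])
      | some priorIdx =>
          match PySem.List.pyGet? result priorIdx with
          | none => none
          | some prior =>
            if entriesByteEqual prior entry then
              dedupeGoA rest firstIndexForLabel (PySem.List.pySetD result priorIdx entry)
            else
              dedupeGoA rest firstIndexForLabel (result ++ [entry])

def dedupe_identical_blocks_py (parsed : List (List (String × String))) : List (List (String × String)) :=
  (dedupeGoA parsed PySem.Dict.empty []).getD []

-- ===== PORT B =====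
def pvFieldsB : List String := ["kind", "statement", "proof", "remark", "source_note"]

-- Source B's sig(entry)
def pvSig (entry : List (String × String)) : List String :=
  pvFieldsB.map (fun f => PySem.Dict.getD (PySem.Dict.mk entry) f "")

-- Source B's first loop: build first_sig and winner; none = KeyError on entry["label"]
def dedupeGoB1 : List (List (String × String)) → PySem.Dict String (List String) → PySem.Dict String (List (String × String)) → Option (PySem.Dict String (List String) × PySem.Dict String (List (String × String)))
  | [], firstSig, winner => some (firstSig, winner)
  | entry :: rest, firstSig, winner =>
    match PySem.Dict.get? (PySem.Dict.mk entry) "label" with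
    | none => none
    | some label =>
      match PySem.Dict.get? firstSig label with
      | none => dedupeGoB1 rest (firstSig.insert label (pvSig entry)) (winner.insert label entry)
      | some s0 =>
        if pvSig entry == s0 then dedupeGoB1 rest firstSig (winner.insert label entry)
        else dedupeGoB1 rest firstSig winner

-- Source B's second loop: emit winners at first occurrences, keep differing duplicates
def dedupeGoB2 : List (List (String × String)) → PySem.Dict String (List String) → PySem.Dict String (List (String × String)) → PySem.Set String → List (List (String × String)) → Option (List (List (String × String)))
  | [], _, _, _, result => some result
  | entry :: rest, firstSig, winner, seen, result =>
    match PySem.Dict.get? (PySem.Dict.mk entry) "label" with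
    | none => none
    | some label =>
      if PySem.Set.contains seen label then
        match PySem.Dict.get? firstSig label with
        | none => none
        | some s0 =>
          if pvSig entry == s0 then dedupeGoB2 rest firstSig winner seen result
          else dedupeGoB2 rest firstSig winner seen (result ++ [entry])
      else
        match PySem.Dict.get? winner label with
        | none => none
        | some w => dedupeGoB2 rest firstSig winner (PySem.Set.add seen label) (result ++ [w])

def dedupe_identical_blocks_py_alt (parsed : List (List (String × String))) : List (List (String × String)) :=
  (match dedupeGoB1 parsed PySem.Dict.empty PySem.Dict.empty with
   | none => none
   | some (firstSig, winner) => dedupeGoB2 parsed firstSig winner [] []).getD []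

-- ===== PRECONDITION & SPEC =====
-- Pre_ excludes exactly the inputs on which Python A raises KeyError: an entry without a "label" key.
def Pre_dedupe_identical_blocks_py (parsed : List (List (String × String))) : Prop :=
  ∀ e ∈ parsed, (PySem.Dict.get? (PySem.Dict.mk e) "label").isSome = true
instance (parsed : List (List (String × String))) : Decidable (Pre_dedupe_identical_blocks_py parsed) := by unfold Pre_dedupe_identical_blocks_py; infer_instance

def pvWitness_dedupe_identical_blocks_py : (List (List (String × String))) :=
  [[("label", "a"), ("kind", "k")], [("label", "a"), ("kind", "k")], [("label", "b")]]

def Spec_dedupe_identical_blocks_py (parsed : List (List (String × String))) (out : List (List (String × String))) : Prop := out = dedupe_identical_blocks_py_alt parsed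
instance (parsed : List (List (String × String))) (out : List (List (String × String))) : Decidable (Spec_dedupe_identical_blocks_py parsed out) := by unfold Spec_dedupe_identical_blocks_py; infer_instance

-- ===== CLAIM (what is proved, stated in full; the proofs are below) =====
def Claim_equal_dedupe_identical_blocks_py : Prop := ∀ (parsed : List (List (String × String))), Dom_dedupe_identical_blocks_py parsed → Pre_dedupe_identical_blocks_py parsed → Spec_dedupe_identical_blocks_py parsed (dedupe_identical_blocks_py parsed)

-- ===== LEMMAS AND PROOFS =====

-- entry["label"] as a total function (agrees with the ports' get? under Pre_)
def pvLbl (e : List (String × String)) : String := PySem.Dict.getD (PySem.Dict.mk e) "label" ""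

-- last entry of r with label l and signature s, as an Option (none = no such entry)
def pvLastO (r : List (List (String × String))) (l : String) (s : List String) : Option (List (String × String)) :=
  r.foldl (fun a x => if pvLbl x = l ∧ pvSig x = s then some x else a) none

def pvLastD (r : List (List (String × String))) (l : String) (s : List String) (d : List (String × String)) : List (String × String) :=
  (pvLastO r l s).getD d

-- the common normal form of both programs: walk the input with the evolving first-signature dict S
def pvTailB : List (List (String × String)) → PySem.Dict String (List String) → List (List (String × String))
  | [], _ => []
  | e :: r, S =>
    match S.get? (pvLbl e) with
    | none => pvLastD r (pvLbl e) (pvSig e) e :: pvTailB r (S.insert (pvLbl e) (pvSig e))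
    | some s => if pvSig e = s then pvTailB r S else e :: pvTailB r S

-- A's accumulated result, with each first-occurrence slot patched by its future winner
def pvPatch : List (List (String × String)) → List (List (String × String)) → List String → List (List (String × String))
  | [], _, _ => []
  | x :: res, rest, seen =>
    if pvLbl x ∈ seen then x :: pvPatch res rest seen
    else pvLastD rest (pvLbl x) (pvSig x) x :: pvPatch res rest (pvLbl x :: seen)

-- per-label signature of the first occurrence (pure form of Source B's first_sig dict)
def pvSof : List (List (String × String)) → PySem.Dict String (List String) → PySem.Dict String (List String)
  | [], S => S
  | x :: res, S =>
    match S.get? (pvLbl x) with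
    | none => pvSof res (S.insert (pvLbl x) (pvSig x))
    | some _ => pvSof res S

-- pure form of Source B's winner dict
def pvWof : List (List (String × String)) → PySem.Dict String (List String) → PySem.Dict String (List (String × String)) → PySem.Dict String (List (String × String))
  | [], _, w => w
  | e :: r, fs, w =>
    match fs.get? (pvLbl e) with
    | none => pvWof r (fs.insert (pvLbl e) (pvSig e)) (w.insert (pvLbl e) e)
    | some s0 => if pvSig e = s0 then pvWof r fs (w.insert (pvLbl e) e) else pvWof r fs w

-- A's first_index_for_label dict is exactly findIdx? on the label over the result list
def pvInv (fid : PySem.Dict String Int) (result : List (List (String × String))) : Prop :=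
  ∀ l, PySem.Dict.get? fid l = (result.findIdx? (fun y => pvLbl y == l)).map (fun n : Nat => (n : Int))

theorem pvLbl_of_get? {e : List (String × String)} {l : String}
    (h : PySem.Dict.get? (PySem.Dict.mk e) "label" = some l) : pvLbl e = l := by
  simp [pvLbl, PySem.Dict.getD, h]

theorem pvByteEq_iff (a b : List (String × String)) :
    entriesByteEqual a b = true ↔ pvSig a = pvSig b := by
  simp [entriesByteEqual, pvSig, pvFieldsA, pvFieldsB, List.all_cons, List.map_cons,
        Bool.and_eq_true, beq_iff_eq, List.cons.injEq]

theorem pvSetSelf {α : Type} : ∀ (l : List α) (n : Nat) (a : α), l[n]? = some a → l.set n a = l := by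
  intro l
  induction l with
  | nil => intro n a h; simp at h
  | cons x l ih =>
    intro n a h
    cases n with
    | zero => simp at h; simp [h]
    | succ m => simp at h; simp [ih m a h]

theorem pvLastO_foldl (l : String) (s : List String) :
    ∀ (r : List (List (String × String))) (a : Option (List (String × String))),
      r.foldl (fun a x => if pvLbl x = l ∧ pvSig x = s then some x else a) a = (pvLastO r l s).or a := by
  intro r
  induction r with
  | nil => intro a; simp [pvLastO]
  | cons x r ih =>
    intro a
    by_cases hP : pvLbl x = l ∧ pvSig x = s
    · have hx : pvLastO (x :: r) l s = (pvLastO r l s).or (some x) := by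
        simp only [pvLastO, List.foldl_cons, if_pos hP]
        rw [ih]
        rfl
      simp only [List.foldl_cons, if_pos hP]
      rw [ih, hx]
      cases pvLastO r l s <;> rfl
    · have hx : pvLastO (x :: r) l s = pvLastO r l s := by
        simp only [pvLastO, List.foldl_cons, if_neg hP]
      simp only [List.foldl_cons, if_neg hP]
      rw [ih, hx]

theorem pvLastO_cons (e : List (String × String)) (r : List (List (String × String))) (l : String) (s : List String) :
    pvLastO (e :: r) l s = (pvLastO r l s).or (if pvLbl e = l ∧ pvSig e = s then some e else none) := by
  have h : pvLastO (e :: r) l s = List.foldl (fun a x => if pvLbl x = l ∧ pvSig x = s then some x else a)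
      (if pvLbl e = l ∧ pvSig e = s then some e else none) r := by
    simp [pvLastO]
  rw [h, pvLastO_foldl]

theorem pvLastO_append (r₁ r₂ : List (List (String × String))) (l : String) (s : List String) :
    pvLastO (r₁ ++ r₂) l s = (pvLastO r₂ l s).or (pvLastO r₁ l s) := by
  induction r₁ with
  | nil => simp [pvLastO]
  | cons x r ih =>
    rw [List.cons_append, pvLastO_cons, pvLastO_cons, ih]
    cases pvLastO r₂ l s <;> cases pvLastO r l s <;> rfl

theorem pvLastO_none (r : List (List (String × String))) (l : String) (s : List String)
    (h : ∀ x ∈ r, pvLbl x ≠ l) : pvLastO r l s = none := by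
  induction r with
  | nil => simp [pvLastO]
  | cons x r ih =>
    rw [pvLastO_cons, ih (fun y hy => h y (List.mem_cons_of_mem x hy))]
    have hx : pvLbl x ≠ l := h x (by simp)
    rw [if_neg (fun hc => hx hc.1)]
    rfl

theorem pvFindIdx?_spec {α : Type} (p : α → Bool) :
    ∀ (res : List α) (n : Nat), res.findIdx? p = some n →
      ∃ x, res[n]? = some x ∧ res.find? p = some x ∧ p x = true := by
  intro res
  induction res with
  | nil => intro n h; simp at h
  | cons x res ih =>
    intro n h
    rw [List.findIdx?_cons] at h
    by_cases hp : p x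
    · rw [if_pos hp] at h
      have hn : n = 0 := by injection h with h'; omega
      subst hn
      exact ⟨x, rfl, List.find?_cons_of_pos hp, hp⟩
    · rw [if_neg hp] at h
      obtain ⟨m, hm, hmn⟩ := Option.map_eq_some_iff.mp h
      obtain ⟨y, hy1, hy2, hy3⟩ := ih m hm
      subst hmn
      exact ⟨y, by simpa using hy1, by rw [List.find?_cons_of_neg hp]; exact hy2, hy3⟩

theorem pvFindIdx?_none {α : Type} (p : α → Bool) (res : List α) (h : res.findIdx? p = none) :
    ∀ x ∈ res, p x = false :=
  List.findIdx?_eq_none_iff.mp h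

theorem pvFindIdx?_append_singleton {α : Type} (p : α → Bool) (e : α) :
    ∀ (res : List α), (res ++ [e]).findIdx? p =
      (res.findIdx? p).or (if p e then some res.length else none) := by
  intro res
  induction res with
  | nil =>
    cases hp : p e <;> simp [List.findIdx?_cons, hp]
  | cons x res ih =>
    by_cases hp : p x
    · simp [List.cons_append, List.findIdx?_cons, hp, Option.some_or]
    · simp only [List.cons_append, List.findIdx?_cons, hp, Bool.false_eq_true, if_false, ih,
        List.length_cons]
      cases hr : res.findIdx? p <;> cases hpe : p e <;> simp_all [Option.or]

theorem pvFindIdx?_set {α : Type} (p : α → Bool) :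
    ∀ (res : List α) (n : Nat) (v x : α), res[n]? = some x → p v = p x →
      (res.set n v).findIdx? p = res.findIdx? p := by
  intro res
  induction res with
  | nil => intro n v x h; simp at h
  | cons y res ih =>
    intro n v x h hpv
    cases n with
    | zero =>
      have hx : y = x := by simpa using h
      subst hx
      simp [List.set_cons_zero, List.findIdx?_cons, hpv]
    | succ m =>
      have h' : res[m]? = some x := by simpa using h
      simp [List.set_cons_succ, List.findIdx?_cons, ih m v x h' hpv]

theorem pvSof_get? :
    ∀ (res : List (List (String × String))) (S : PySem.Dict String (List String)) (l : String),
      (pvSof res S).get? l = (S.get? l).or ((res.find? (fun y => pvLbl y == l)).map pvSig) := by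
  intro res
  induction res with
  | nil => intro S l; simp [pvSof]
  | cons x res ih =>
    intro S l
    cases hS : S.get? (pvLbl x) with
    | none =>
      simp only [pvSof, hS]
      rw [ih]
      by_cases hl : l = pvLbl x
      · subst hl
        rw [PySem.Dict.get?_insert_self, hS, List.find?_cons_of_pos (by simp)]
        simp [Option.or]
      · rw [PySem.Dict.get?_insert_of_ne _ _ hl, List.find?_cons_of_neg (by simp [Ne.symm hl])]
    | some s =>
      simp only [pvSof, hS]
      rw [ih]
      by_cases hl : l = pvLbl x
      · subst hl
        rw [hS, List.find?_cons_of_pos (by simp)]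
        simp [Option.or]
      · rw [List.find?_cons_of_neg (by simp [Ne.symm hl])]

theorem pvSof_append_singleton (e : List (String × String)) :
    ∀ (res : List (List (String × String))) (S : PySem.Dict String (List String)),
      pvSof (res ++ [e]) S =
        match (pvSof res S).get? (pvLbl e) with
        | none => (pvSof res S).insert (pvLbl e) (pvSig e)
        | some _ => pvSof res S := by
  intro res
  induction res with
  | nil =>
    intro S
    cases hS : S.get? (pvLbl e) <;> simp [pvSof, hS]
  | cons x res ih =>
    intro S
    simp only [List.cons_append, pvSof]
    cases S.get? (pvLbl x) <;> exact ih _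

theorem pvSof_congr :
    ∀ (res res' : List (List (String × String))),
      res.map (fun x => (pvLbl x, pvSig x)) = res'.map (fun x => (pvLbl x, pvSig x)) →
      ∀ S, pvSof res S = pvSof res' S := by
  intro res
  induction res with
  | nil =>
    intro res' h S
    cases res' with
    | nil => rfl
    | cons a b => simp at h
  | cons x res ih =>
    intro res' h S
    cases res' with
    | nil => simp at h
    | cons x' res'' =>
      simp only [List.map_cons, List.cons.injEq, Prod.mk.injEq] at h
      obtain ⟨⟨hl, hs⟩, ht⟩ := h
      simp only [pvSof, hl, hs]
      cases S.get? (pvLbl x') <;> exact ih res'' ht _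

theorem pvPatch_nil_rest : ∀ (res : List (List (String × String))) (seen : List String),
    pvPatch res [] seen = res := by
  intro res
  induction res with
  | nil => intro seen; rfl
  | cons x res ih =>
    intro seen
    by_cases hx : pvLbl x ∈ seen <;> simp [pvPatch, hx, ih, pvLastD, pvLastO]

theorem pvPatch_append_singleton (e : List (String × String)) (rest : List (List (String × String))) :
    ∀ (res : List (List (String × String))) (seen : List String),
      pvPatch (res ++ [e]) rest seen = pvPatch res rest seen ++
        [if pvLbl e ∈ seen ∨ pvLbl e ∈ res.map pvLbl then e
         else pvLastD rest (pvLbl e) (pvSig e) e] := by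
  intro res
  induction res with
  | nil =>
    intro seen
    by_cases hm : pvLbl e ∈ seen <;> simp [pvPatch, hm]
  | cons x res ih =>
    intro seen
    by_cases hx : pvLbl x ∈ seen
    · have hiff : (pvLbl e ∈ seen ∨ pvLbl e ∈ List.map pvLbl res) ↔
          (pvLbl e ∈ seen ∨ pvLbl e ∈ List.map pvLbl (x :: res)) := by
        simp only [List.map_cons, List.mem_cons]
        constructor
        · tauto
        · rintro (h | h | h)
          · exact Or.inl h
          · exact Or.inl (h ▸ hx)
          · exact Or.inr h
      simp only [List.cons_append, pvPatch, if_pos hx, ih, if_congr hiff rfl rfl]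
    · have hiff : (pvLbl e ∈ pvLbl x :: seen ∨ pvLbl e ∈ List.map pvLbl res) ↔
          (pvLbl e ∈ seen ∨ pvLbl e ∈ List.map pvLbl (x :: res)) := by
        simp only [List.map_cons, List.mem_cons]
        tauto
      simp only [List.cons_append, pvPatch, if_neg hx, ih, if_congr hiff rfl rfl]

theorem pvPatch_cons_skip (e : List (String × String)) (rest : List (List (String × String))) :
    ∀ (res : List (List (String × String))) (seen : List String),
      (pvLbl e ∈ seen ∨ ∀ x, res.find? (fun y => pvLbl y == pvLbl e) = some x → pvSig x ≠ pvSig e) →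
      pvPatch res (e :: rest) seen = pvPatch res rest seen := by
  intro res
  induction res with
  | nil => intro seen _; rfl
  | cons x res ih =>
    intro seen hyp
    by_cases hx : pvLbl x ∈ seen
    · simp only [pvPatch, if_pos hx]
      congr 1
      apply ih
      rcases hyp with h | h
      · exact Or.inl h
      · by_cases hbx : pvLbl x = pvLbl e
        · exact Or.inl (hbx ▸ hx)
        · refine Or.inr fun x' hx' => h x' ?_
          rw [List.find?_cons_of_neg (by simp [hbx])]
          exact hx'
    · by_cases hbx : pvLbl x = pvLbl e
      · have hsig : pvSig x ≠ pvSig e := by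
          rcases hyp with h | h
          · exact absurd (hbx ▸ h) hx
          · exact h x (List.find?_cons_of_pos (by simp [hbx]))
        simp only [pvPatch, if_neg hx]
        have hhead : pvLastD (e :: rest) (pvLbl x) (pvSig x) x = pvLastD rest (pvLbl x) (pvSig x) x := by
          simp only [pvLastD, pvLastO_cons]
          rw [if_neg (fun hc => hsig (by rw [hc.2])), Option.or_none]
        rw [hhead]
        congr 1
        exact ih _ (Or.inl (by simp [hbx]))
      · simp only [pvPatch, if_neg hx]
        have hhead : pvLastD (e :: rest) (pvLbl x) (pvSig x) x = pvLastD rest (pvLbl x) (pvSig x) x := by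
          simp only [pvLastD, pvLastO_cons]
          rw [if_neg (fun hc => hbx hc.1.symm), Option.or_none]
        rw [hhead]
        congr 1
        apply ih
        rcases hyp with h | h
        · exact Or.inl (List.mem_cons_of_mem _ h)
        · refine Or.inr fun x' hx' => h x' ?_
          rw [List.find?_cons_of_neg (by simp [hbx])]
          exact hx'

theorem pvPatch_set (e : List (String × String)) (rest : List (List (String × String))) :
    ∀ (res : List (List (String × String))) (n : Nat) (seen : List String) (x : List (String × String)),
      res.findIdx? (fun y => pvLbl y == pvLbl e) = some n → res[n]? = some x →
      pvLbl e ∉ seen → pvSig x = pvSig e →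
      pvPatch (res.set n e) rest seen = pvPatch res (e :: rest) seen := by
  intro res
  induction res with
  | nil => intro n seen x h; simp at h
  | cons y res ih =>
    intro n seen x hidx hget hsn hsig
    rw [List.findIdx?_cons] at hidx
    by_cases hy : (pvLbl y == pvLbl e) = true
    · rw [if_pos hy] at hidx
      have hn : n = 0 := by injection hidx with h'; omega
      subst hn
      have hx : y = x := by simpa using hget
      subst hx
      have hly : pvLbl y = pvLbl e := by simpa using hy
      simp only [List.set_cons_zero, pvPatch]
      rw [if_neg hsn, if_neg (fun hc => hsn (hly ▸ hc))]
      have hhead : pvLastD (e :: rest) (pvLbl y) (pvSig y) y = pvLastD rest (pvLbl e) (pvSig e) e := by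
        simp only [pvLastD, pvLastO_cons]
        rw [if_pos ⟨hly.symm, hsig.symm⟩, Option.or_some]
        rw [hly, hsig]
        rfl
      rw [hhead]
      congr 1
      rw [hly]
      exact (pvPatch_cons_skip e rest res (pvLbl e :: seen) (Or.inl (by simp))).symm
    · rw [if_neg hy] at hidx
      obtain ⟨m, hm, hmn⟩ := Option.map_eq_some_iff.mp hidx
      subst hmn
      have hget' : res[m]? = some x := by simpa using hget
      have hly : pvLbl y ≠ pvLbl e := by simpa using hy
      simp only [List.set_cons_succ, pvPatch]
      by_cases hys : pvLbl y ∈ seen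
      · rw [if_pos hys, if_pos hys]
        congr 1
        exact ih m seen x hm hget' hsn hsig
      · rw [if_neg hys, if_neg hys]
        have hhead : pvLastD (e :: rest) (pvLbl y) (pvSig y) y = pvLastD rest (pvLbl y) (pvSig y) y := by
          simp only [pvLastD, pvLastO_cons]
          rw [if_neg (fun hc => hly hc.1.symm), Option.or_none]
        rw [hhead]
        congr 1
        exact ih m (pvLbl y :: seen) x hm hget' (by simp [hsn, Ne.symm hly]) hsig

theorem pvGoA_eq :
    ∀ (rest : List (List (String × String))) (fid : PySem.Dict String Int) (result : List (List (String × String))),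
      (∀ e ∈ rest, (PySem.Dict.get? (PySem.Dict.mk e) "label").isSome = true) →
      pvInv fid result →
      dedupeGoA rest fid result = some (pvPatch result rest [] ++ pvTailB rest (pvSof result PySem.Dict.empty)) := by
  intro rest
  induction rest with
  | nil => intro fid result _ _; simp [dedupeGoA, pvTailB, pvPatch_nil_rest]
  | cons e rest ih =>
    intro fid result hlab hinv
    obtain ⟨l, hget⟩ := Option.isSome_iff_exists.mp (hlab e (by simp))
    have hle : pvLbl e = l := pvLbl_of_get? hget
    have hlab' : ∀ x ∈ rest, (PySem.Dict.get? (PySem.Dict.mk x) "label").isSome = true :=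
      fun x hx => hlab x (by simp [hx])
    simp only [dedupeGoA, hget]
    cases hfid : PySem.Dict.get? fid l with
    | none =>
      have hnone : result.findIdx? (fun y => pvLbl y == l) = none := by
        have h2 := hinv l
        rw [hfid] at h2
        cases hidxc : result.findIdx? (fun y => pvLbl y == l) with
        | none => rfl
        | some n => rw [hidxc] at h2; simp at h2
      have hmem : ∀ x ∈ result, pvLbl x ≠ l := by
        intro x hx
        have := pvFindIdx?_none _ _ hnone x hx
        simpa using this
      have hfind : result.find? (fun y => pvLbl y == l) = none :=
        List.find?_eq_none.mpr (fun x hx => by simp [hmem x hx])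
      have hinv' : pvInv (fid.insert l (result.length : Int)) (result ++ [e]) := by
        intro l'
        rw [pvFindIdx?_append_singleton]
        by_cases hl' : l' = l
        · subst hl'
          rw [PySem.Dict.get?_insert_self, hnone, Option.none_or, if_pos (by simp [hle])]
          rfl
        · rw [PySem.Dict.get?_insert_of_ne _ _ hl', hinv l',
            if_neg (by simp [hle, Ne.symm hl'])]
          rw [Option.or_none]
      rw [ih _ _ hlab' hinv']
      have hS : (pvSof result PySem.Dict.empty).get? (pvLbl e) = none := by
        rw [hle, pvSof_get?, hfind]
        simp
      have h1 : pvSof (result ++ [e]) PySem.Dict.empty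
          = (pvSof result PySem.Dict.empty).insert (pvLbl e) (pvSig e) := by
        rw [pvSof_append_singleton, hS]
      have h2 : pvPatch (result ++ [e]) rest [] = pvPatch result rest [] ++ [pvLastD rest (pvLbl e) (pvSig e) e] := by
        rw [pvPatch_append_singleton, if_neg]
        rintro (h | h)
        · exact absurd h (List.not_mem_nil)
        · obtain ⟨x, hx, hxe⟩ := List.mem_map.mp h
          exact hmem x hx (by rw [hxe, hle])
      have h3 : pvPatch result (e :: rest) [] = pvPatch result rest [] := by
        apply pvPatch_cons_skip
        refine Or.inr fun x hx => ?_
        rw [hle, hfind] at hx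
        cases hx
      have h4 : pvTailB (e :: rest) (pvSof result PySem.Dict.empty)
          = pvLastD rest (pvLbl e) (pvSig e) e :: pvTailB rest ((pvSof result PySem.Dict.empty).insert (pvLbl e) (pvSig e)) := by
        simp only [pvTailB, hS]
      rw [h1, h2, h3, h4]
      simp
    | some i =>
      have h := hinv l
      rw [hfid] at h
      obtain ⟨n, hidx, hni⟩ : ∃ n, result.findIdx? (fun y => pvLbl y == l) = some n ∧ i = (n : Int) := by
        cases hidxc : result.findIdx? (fun y => pvLbl y == l) with
        | none => rw [hidxc] at h; simp at h
        | some n => rw [hidxc] at h; simp at h; exact ⟨n, rfl, h⟩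
      subst hni
      obtain ⟨x, hgetx, hfindx, hpredx⟩ := pvFindIdx?_spec _ result n hidx
      have hlx : pvLbl x = l := by simpa using hpredx
      simp only [PySem.List.pyGet?_natCast, hgetx]
      have hS : (pvSof result PySem.Dict.empty).get? (pvLbl e) = some (pvSig x) := by
        rw [hle, pvSof_get?, hfindx]
        simp
      by_cases hbe : entriesByteEqual x e = true
      · have hsig : pvSig x = pvSig e := (pvByteEq_iff x e).mp hbe
        rw [if_pos hbe, PySem.List.pySetD_natCast]
        have hinv' : pvInv fid (result.set n e) := by
          intro l'
          rw [pvFindIdx?_set _ result n e x hgetx (by simp only [hle, hlx]), hinv l']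
        rw [ih _ _ hlab' hinv']
        have hpair : (result.set n e).map (fun y => (pvLbl y, pvSig y)) = result.map (fun y => (pvLbl y, pvSig y)) := by
          rw [List.map_set]
          apply pvSetSelf
          rw [List.getElem?_map, hgetx]
          simp [hle, hlx, hsig]
        have h1 : pvSof (result.set n e) PySem.Dict.empty = pvSof result PySem.Dict.empty :=
          pvSof_congr _ _ hpair _
        have h2 : pvPatch (result.set n e) rest [] = pvPatch result (e :: rest) [] := by
          apply pvPatch_set e rest result n [] x _ hgetx (List.not_mem_nil) hsig
          rw [hle]
          exact hidx
        have h3 : pvTailB (e :: rest) (pvSof result PySem.Dict.empty) = pvTailB rest (pvSof result PySem.Dict.empty) := by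
          simp only [pvTailB, hS]
          rw [if_pos hsig.symm]
        rw [h1, h2, h3]
      · have hsig : pvSig x ≠ pvSig e := fun hc => hbe ((pvByteEq_iff x e).mpr hc)
        rw [if_neg hbe]
        have hinv' : pvInv fid (result ++ [e]) := by
          intro l'
          rw [pvFindIdx?_append_singleton]
          by_cases hl' : l' = l
          · subst hl'
            rw [hidx, Option.some_or, hfid]
            rfl
          · rw [hinv l', if_neg (by simp [hle, Ne.symm hl']), Option.or_none]
        rw [ih _ _ hlab' hinv']
        have h1 : pvSof (result ++ [e]) PySem.Dict.empty = pvSof result PySem.Dict.empty := by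
          rw [pvSof_append_singleton, hS]
        have h2 : pvPatch (result ++ [e]) rest [] = pvPatch result rest [] ++ [e] := by
          rw [pvPatch_append_singleton, if_pos]
          exact Or.inr (List.mem_map.mpr ⟨x, List.mem_of_find?_eq_some hfindx, by rw [hlx, hle]⟩)
        have h3 : pvPatch result (e :: rest) [] = pvPatch result rest [] := by
          apply pvPatch_cons_skip
          refine Or.inr fun x' hx' => ?_
          rw [hle, hfindx] at hx'
          injection hx' with hxx
          rw [← hxx]
          exact hsig
        have h4 : pvTailB (e :: rest) (pvSof result PySem.Dict.empty) = e :: pvTailB rest (pvSof result PySem.Dict.empty) := by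
          simp only [pvTailB, hS]
          rw [if_neg (fun hc => hsig hc.symm)]
        rw [h1, h2, h3, h4]
        simp

theorem pvGoB1_eq :
    ∀ (r : List (List (String × String))) (fs : PySem.Dict String (List String)) (w : PySem.Dict String (List (String × String))),
      (∀ e ∈ r, (PySem.Dict.get? (PySem.Dict.mk e) "label").isSome = true) →
      dedupeGoB1 r fs w = some (pvSof r fs, pvWof r fs w) := by
  intro r
  induction r with
  | nil => intro fs w _; rfl
  | cons e r ih =>
    intro fs w hlab
    obtain ⟨l, hget⟩ := Option.isSome_iff_exists.mp (hlab e (by simp))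
    have hle : pvLbl e = l := pvLbl_of_get? hget
    have hlab' : ∀ x ∈ r, (PySem.Dict.get? (PySem.Dict.mk x) "label").isSome = true :=
      fun x hx => hlab x (by simp [hx])
    simp only [dedupeGoB1, hget, pvSof, pvWof, hle]
    cases hfs : fs.get? l with
    | none => exact ih _ _ hlab'
    | some s0 =>
      by_cases hsig : pvSig e = s0
      · simp only [beq_iff_eq, if_pos hsig]
        exact ih _ _ hlab'
      · simp only [beq_iff_eq, if_neg hsig]
        exact ih _ _ hlab'

theorem pvWof_get? :
    ∀ (ps : List (List (String × String))) (fs : PySem.Dict String (List String)) (w : PySem.Dict String (List (String × String))) (l : String),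
      (pvWof ps fs w).get? l =
        match fs.get? l with
        | some s0 => (pvLastO ps l s0).or (w.get? l)
        | none =>
          match ps.find? (fun y => pvLbl y == l) with
          | none => w.get? l
          | some f0 => (pvLastO ps l (pvSig f0)).or (w.get? l) := by
  intro ps
  induction ps with
  | nil =>
    intro fs w l
    cases fs.get? l <;> simp [pvWof, pvLastO]
  | cons x ps ih =>
    intro fs w l
    have hlastne : ∀ (s : List String), pvLbl x ≠ l → pvLastO (x :: ps) l s = pvLastO ps l s := by
      intro s hne
      rw [pvLastO_cons, if_neg (fun hc => hne hc.1), Option.or_none]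
    cases hfx : fs.get? (pvLbl x) with
    | none =>
      simp only [pvWof, hfx]
      rw [ih]
      by_cases hl : l = pvLbl x
      · subst hl
        have hfp : List.find? (fun y => pvLbl y == pvLbl x) (x :: ps) = some x :=
          List.find?_cons_of_pos (by simp)
        simp only [PySem.Dict.get?_insert_self, hfx, hfp]
        rw [pvLastO_cons, if_pos ⟨rfl, rfl⟩]
        cases pvLastO ps (pvLbl x) (pvSig x) <;> rfl
      · rw [PySem.Dict.get?_insert_of_ne _ _ hl, PySem.Dict.get?_insert_of_ne _ _ hl,
          List.find?_cons_of_neg (by simp [Ne.symm hl])]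
        simp only [hlastne _ (Ne.symm hl)]
    | some s0x =>
      by_cases hsig : pvSig x = s0x
      · simp only [pvWof, hfx, if_pos hsig]
        rw [ih]
        by_cases hl : l = pvLbl x
        · subst hl
          simp only [PySem.Dict.get?_insert_self, hfx]
          rw [pvLastO_cons, if_pos ⟨rfl, hsig⟩]
          cases pvLastO ps (pvLbl x) s0x <;> rfl
        · rw [PySem.Dict.get?_insert_of_ne _ _ hl,
            List.find?_cons_of_neg (by simp [Ne.symm hl])]
          simp only [hlastne _ (Ne.symm hl)]
      · simp only [pvWof, hfx, if_neg hsig]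
        rw [ih]
        by_cases hl : l = pvLbl x
        · subst hl
          simp only [hfx]
          rw [pvLastO_cons, if_neg (fun hc => hsig hc.2), Option.or_none]
        · rw [List.find?_cons_of_neg (by simp [Ne.symm hl])]
          simp only [hlastne _ (Ne.symm hl)]

theorem pvGoB2_eq (parsed : List (List (String × String))) :
    ∀ (rem pre : List (List (String × String))) (seen : PySem.Set String) (res : List (List (String × String))),
      parsed = pre ++ rem →
      (∀ e ∈ rem, (PySem.Dict.get? (PySem.Dict.mk e) "label").isSome = true) →
      (∀ l, PySem.Set.contains seen l = true ↔ l ∈ pre.map pvLbl) →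
      dedupeGoB2 rem (pvSof parsed PySem.Dict.empty) (pvWof parsed PySem.Dict.empty PySem.Dict.empty) seen res =
        some (res ++ pvTailB rem (pvSof pre PySem.Dict.empty)) := by
  intro rem
  induction rem with
  | nil => intro pre seen res _ _ _; simp [dedupeGoB2, pvTailB]
  | cons e rem ih =>
    intro pre seen res hsplit hlab hseen
    subst hsplit
    obtain ⟨l, hget⟩ := Option.isSome_iff_exists.mp (hlab e (by simp))
    have hle : pvLbl e = l := pvLbl_of_get? hget
    have hlab' : ∀ x ∈ rem, (PySem.Dict.get? (PySem.Dict.mk x) "label").isSome = true :=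
      fun x hx => hlab x (by simp [hx])
    simp only [dedupeGoB2, hget]
    by_cases hmem : l ∈ pre.map pvLbl
    · have hcont : PySem.Set.contains seen l = true := (hseen l).mpr hmem
      rw [if_pos hcont]
      obtain ⟨x0, hx0mem, hx0l⟩ : ∃ x0 ∈ pre, pvLbl x0 = l := by
        obtain ⟨x0, hx0, hx0l⟩ := List.mem_map.mp hmem
        exact ⟨x0, hx0, hx0l⟩
      have hfs1 : (pre.find? (fun y => pvLbl y == l)).isSome = true :=
        List.find?_isSome.mpr ⟨x0, hx0mem, by simpa using hx0l⟩
      obtain ⟨x1, hfind0⟩ := Option.isSome_iff_exists.mp hfs1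
      have hSfull : (pvSof (pre ++ e :: rem) PySem.Dict.empty).get? l = some (pvSig x1) := by
        rw [pvSof_get?, List.find?_append, hfind0, Option.some_or]
        simp [pysem]
      have hSpre : (pvSof pre PySem.Dict.empty).get? l = some (pvSig x1) := by
        rw [pvSof_get?, hfind0]
        simp
      have hseen' : ∀ l', PySem.Set.contains seen l' = true ↔ l' ∈ (pre ++ [e]).map pvLbl := by
        intro l'
        rw [hseen l']
        simp only [List.map_append, List.mem_append, List.map_cons, List.map_nil, List.mem_cons,
          List.not_mem_nil, or_false, hle]
        constructor
        · exact Or.inl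
        · rintro (h | h)
          · exact h
          · exact h ▸ hmem
      have hpre' : pvSof (pre ++ [e]) PySem.Dict.empty = pvSof pre PySem.Dict.empty := by
        rw [pvSof_append_singleton, hle, hSpre]
      simp only [hSfull]
      by_cases hsig : pvSig e = pvSig x1
      · rw [if_pos (beq_iff_eq.mpr hsig)]
        have hrec := ih (pre ++ [e]) seen res (by simp) hlab' hseen'
        rw [hrec, hpre']
        simp only [pvTailB, hle, hSpre, if_pos hsig]
      · rw [if_neg (fun hc => hsig (beq_iff_eq.mp hc))]
        have hrec := ih (pre ++ [e]) seen (res ++ [e]) (by simp) hlab' hseen'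
        rw [List.append_assoc] at hrec
        rw [hrec, hpre']
        simp only [pvTailB, hle, hSpre, if_neg hsig]
        simp
    · have hcont : ¬ PySem.Set.contains seen l = true :=
        fun hc => hmem ((hseen l).mp hc)
      rw [if_neg hcont]
      have hmempre : ∀ x ∈ pre, pvLbl x ≠ l := by
        intro x hx hc
        exact hmem (List.mem_map.mpr ⟨x, hx, hc⟩)
      have hfindpre : pre.find? (fun y => pvLbl y == l) = none :=
        List.find?_eq_none.mpr (fun x hx => by simp [hmempre x hx])
      have hemp : (PySem.Dict.empty : PySem.Dict String (List (String × String))).get? l = none := by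
        simp [pysem]
      have hempS : (PySem.Dict.empty : PySem.Dict String (List String)).get? l = none := by
        simp [pysem]
      have hfe : List.find? (fun y => pvLbl y == l) (e :: rem) = some e :=
        List.find?_cons_of_pos (by simp [hle])
      have hlaste : pvLastO (pre ++ e :: rem) l (pvSig e) = some (pvLastD rem l (pvSig e) e) := by
        rw [pvLastO_append, pvLastO_none pre l (pvSig e) hmempre, Option.or_none, pvLastO_cons,
          if_pos ⟨hle, rfl⟩, Option.or_some]
        rfl
      have hW : (pvWof (pre ++ e :: rem) PySem.Dict.empty PySem.Dict.empty).get? l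
          = some (pvLastD rem l (pvSig e) e) := by
        rw [pvWof_get?, hempS]
        simp only [List.find?_append, hfindpre, Option.none_or, hfe, hlaste, hemp, Option.or_none]
      simp only [hW]
      have hseen' : ∀ l', PySem.Set.contains (seen.add l) l' = true ↔ l' ∈ (pre ++ [e]).map pvLbl := by
        intro l'
        rw [PySem.Set.contains_iff, PySem.Set.mem_add]
        simp only [List.map_append, List.mem_append, List.map_cons, List.map_nil, List.mem_cons,
          List.not_mem_nil, or_false, hle]
        rw [← PySem.Set.contains_iff, hseen l']
      have hrec := ih (pre ++ [e]) (seen.add l) (res ++ [pvLastD rem l (pvSig e) e]) (by simp) hlab' hseen'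
      rw [List.append_assoc] at hrec
      rw [hrec]
      have hSpre0 : (pvSof pre PySem.Dict.empty).get? l = none := by
        rw [pvSof_get?, hfindpre]
        simp
      have hpre' : pvSof (pre ++ [e]) PySem.Dict.empty
          = (pvSof pre PySem.Dict.empty).insert l (pvSig e) := by
        rw [pvSof_append_singleton, hle, hSpre0]
      rw [hpre']
      simp only [pvTailB, hle, hSpre0]
      simp

-- ===== VERDICT (by name: the statement is the Claim_ definition above) =====
theorem dedupe_identical_blocks_py_spec : Claim_equal_dedupe_identical_blocks_py := by
  intro parsed _hdom hpre
  unfold Spec_dedupe_identical_blocks_py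
  have hpre' : ∀ e ∈ parsed, (PySem.Dict.get? (PySem.Dict.mk e) "label").isSome = true := hpre
  have hA : dedupe_identical_blocks_py parsed = pvTailB parsed (pvSof [] PySem.Dict.empty) := by
    have hinv0 : pvInv PySem.Dict.empty [] := by
      intro l
      simp [pysem, List.findIdx?_nil]
    unfold dedupe_identical_blocks_py
    rw [pvGoA_eq parsed PySem.Dict.empty [] hpre' hinv0]
    simp [pvPatch]
  have hB : dedupe_identical_blocks_py_alt parsed = pvTailB parsed (pvSof [] PySem.Dict.empty) := by
    have hseen0 : ∀ l, PySem.Set.contains ([] : PySem.Set String) l = true ↔ l ∈ ([] : List (List (String × String))).map pvLbl := by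
      intro l
      rw [PySem.Set.contains_iff]
      simp
    unfold dedupe_identical_blocks_py_alt
    rw [pvGoB1_eq parsed _ _ hpre']
    show (dedupeGoB2 parsed (pvSof parsed PySem.Dict.empty) (pvWof parsed PySem.Dict.empty PySem.Dict.empty) [] []).getD []
      = pvTailB parsed (pvSof [] PySem.Dict.empty)
    rw [pvGoB2_eq parsed parsed [] ([] : PySem.Set String) [] rfl hpre' hseen0]
    simp
  rw [hA, hB]
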